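-- pv_equiv track=rewrite | github.com/pypi-data/pypi-mirror-281 | packages/selkie/selkie-0.25.2-py3-none-any.whl/selkie/corpus/lgc22.py | standardize_token
-- ===== SOURCE A (Python) =====
-- def standardize_token (s):
--     j = len(s)
--     i = j-1
--     while i > 0 and s[i].isdigit():
--         i -= 1
--     if 0 < i < j and s[i] == '.':
--         return s
--     else:
--         return s + '.0'
-- ===== SOURCE B (Python) =====
-- def standardize_token(s):
--     i = s.rfind('.')
--     if i > 0 and all(c.isdigit() for c in s[i+1:]):
--         return s
--     return s + '.0'
-- ===== Notes on version B (the rewrite author's own statement) =====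
-- stated objective: simpler
-- what changed: Replaces A's fused backward index-walk (decrement i while s[i] is a digit, then test s[i]=='.') with a locate-then-validate decomposition: find the last dot once with s.rfind('.'), then check that everything after it is digits.
import Mathlib
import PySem

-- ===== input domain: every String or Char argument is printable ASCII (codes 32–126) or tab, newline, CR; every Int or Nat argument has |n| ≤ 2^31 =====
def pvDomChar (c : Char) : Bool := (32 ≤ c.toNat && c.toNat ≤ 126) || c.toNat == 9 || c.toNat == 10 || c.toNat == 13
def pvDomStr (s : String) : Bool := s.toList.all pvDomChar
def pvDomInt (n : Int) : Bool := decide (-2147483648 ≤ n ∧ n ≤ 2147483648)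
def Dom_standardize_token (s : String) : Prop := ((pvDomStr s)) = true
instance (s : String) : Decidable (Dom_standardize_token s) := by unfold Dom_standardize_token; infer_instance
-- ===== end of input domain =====

-- B replaces A's fused backward digit-walk with locate-the-last-dot (rfind) then validate-the-suffix; same O(n) cost, simpler.

-- ===== PORT A =====
-- A's while loop `while i > 0 and s[i].isdigit(): i -= 1`, started at i = len(s)-1.
-- The index i+1 is always in range at every call below (i+1 ≤ len(s)-1), so `getD ' '` never takes its default.
def pvALoop (cs : List Char) : Nat → Nat
  | 0 => 0
  | i + 1 => if PySem.Chars.isdigit (cs.getD (i + 1) ' ') then pvALoop cs i else i + 1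

def standardize_token (s : String) : String :=
  let cs := s.toList
  let j : Int := cs.length
  -- i = j - 1; while i > 0 and s[i].isdigit(): i -= 1   (when cs = [] the loop body never runs and i stays j-1 = -1)
  let i : Int := if cs.length = 0 then j - 1 else (pvALoop cs (cs.length - 1) : Int)
  if 0 < i ∧ i < j ∧ PySem.List.pyGet? cs i = some '.' then s else s ++ ".0"

-- ===== PORT B =====
def standardize_token_alt (s : String) : String :=
  let i : Int := PySem.Str.rfind s "."
  if 0 < i ∧ (PySem.Str.slice s (some (i + 1)) none).toList.all PySem.Chars.isdigit = true then s
  else s ++ ".0"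

-- ===== PRECONDITION & SPEC =====
def Spec_standardize_token (s : String) (out : String) : Prop := out = standardize_token_alt s
instance (s : String) (out : String) : Decidable (Spec_standardize_token s out) := by unfold Spec_standardize_token; infer_instance

-- ===== CLAIM (what is proved, stated in full; the proofs are below) =====
def Claim_equal_standardize_token : Prop := ∀ (s : String), Dom_standardize_token s → Spec_standardize_token s (standardize_token s)

-- ===== LEMMAS AND PROOFS =====

-- the common characterisation: a dot at a positive index that is followed only by digits
def pvMid (cs : List Char) : Prop :=
  ∃ i : Nat, 0 < i ∧ i < cs.length ∧ cs[i]? = some '.' ∧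
    ∀ m : Nat, i < m → m < cs.length → PySem.Chars.isdigit (cs.getD m ' ') = true

lemma pvALoop_le (cs : List Char) (n : Nat) : pvALoop cs n ≤ n := by
  induction n with
  | zero => simp [pvALoop]
  | succ k ih => unfold pvALoop; split <;> omega

lemma pvALoop_digits (cs : List Char) (n : Nat) :
    ∀ m : Nat, pvALoop cs n < m → m ≤ n → PySem.Chars.isdigit (cs.getD m ' ') = true := by
  induction n with
  | zero => intro m h1 h2; omega
  | succ k ih =>
      intro m h1 h2
      unfold pvALoop at h1
      by_cases hd : PySem.Chars.isdigit (cs.getD (k + 1) ' ') = true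
      · rw [if_pos hd] at h1
        rcases Nat.lt_or_ge m (k + 1) with hm | hm
        · exact ih m h1 (by omega)
        · have hm1 : m = k + 1 := by omega
          rw [hm1]; exact hd
      · rw [if_neg hd] at h1; omega

lemma pvALoop_eq_of (cs : List Char) (i : Nat) (hi : 0 < i)
    (hstop : PySem.Chars.isdigit (cs.getD i ' ') = false) :
    ∀ n : Nat, i ≤ n → (∀ m : Nat, i < m → m ≤ n → PySem.Chars.isdigit (cs.getD m ' ') = true) →
      pvALoop cs n = i := by
  intro n
  induction n with
  | zero => intro h _; omega
  | succ k ih =>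
      intro hle hdig
      rcases Nat.lt_or_ge k i with hk | hk
      · have hik : i = k + 1 := by omega
        unfold pvALoop
        have hnd : ¬ PySem.Chars.isdigit (cs.getD (k + 1) ' ') = true := by
          rw [← hik, hstop]; simp
        rw [if_neg hnd]; omega
      · unfold pvALoop
        have hd1 : PySem.Chars.isdigit (cs.getD (k + 1) ' ') = true := hdig (k + 1) (by omega) (by omega)
        rw [if_pos hd1]
        exact ih hk (fun m h1 h2 => hdig m h1 (by omega))

-- ['.'] is a prefix of l iff l's head is '.'
lemma pvPrefixDot (l : List Char) : ['.'].isPrefixOf l = true ↔ l.head? = some '.' := by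
  cases l with
  | nil => simp [List.isPrefixOf]
  | cons a t =>
      simp [List.isPrefixOf]
      exact eq_comm

lemma pvGo_mem (cs : List Char) (n : Nat) (h : 0 ≤ PySem.Chars.rfind.go cs ['.'] n) :
    cs[(PySem.Chars.rfind.go cs ['.'] n).toNat]? = some '.' := by
  induction n with
  | zero =>
      unfold PySem.Chars.rfind.go at h ⊢
      by_cases hp : ['.'].isPrefixOf cs = true
      · rw [if_pos hp] at h ⊢
        rw [pvPrefixDot, List.head?_eq_getElem?] at hp
        simpa using hp
      · rw [if_neg hp] at h; omega
  | succ k ih =>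
      unfold PySem.Chars.rfind.go at h ⊢
      by_cases hp : ['.'].isPrefixOf (cs.drop (k + 1)) = true
      · rw [if_pos hp] at h ⊢
        rw [pvPrefixDot, List.head?_drop] at hp
        simpa using hp
      · rw [if_neg hp] at h ⊢
        exact ih h

lemma pvGo_ge (cs : List Char) (n : Nat) (i : Nat) (hin : i ≤ n) (hd : cs[i]? = some '.') :
    (i : Int) ≤ PySem.Chars.rfind.go cs ['.'] n := by
  induction n with
  | zero =>
      have hi0 : i = 0 := by omega
      subst hi0
      unfold PySem.Chars.rfind.go
      have hp : ['.'].isPrefixOf cs = true := by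
        rw [pvPrefixDot, List.head?_eq_getElem?]; exact hd
      rw [if_pos hp]
      simp
  | succ k ih =>
      unfold PySem.Chars.rfind.go
      by_cases hp : ['.'].isPrefixOf (cs.drop (k + 1)) = true
      · rw [if_pos hp]; push_cast; omega
      · rw [if_neg hp]
        rcases Nat.lt_or_ge i (k + 1) with hik | hik
        · exact ih (by omega)
        · exfalso
          have hik1 : i = k + 1 := by omega
          rw [pvPrefixDot, List.head?_drop] at hp
          rw [hik1] at hd
          exact hp hd

lemma pvAllDrop (cs : List Char) (k : Nat) :
    (cs.drop k).all PySem.Chars.isdigit = true ↔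
      ∀ m : Nat, k ≤ m → m < cs.length → PySem.Chars.isdigit (cs.getD m ' ') = true := by
  rw [List.all_eq_true]
  constructor
  · intro h m hk hm
    rw [List.getD_eq_getElem cs ' ' hm]
    apply h
    rw [List.mem_iff_getElem]
    refine ⟨m - k, by simp; omega, ?_⟩
    rw [List.getElem_drop]
    congr 1
    omega
  · intro h c hc
    rw [List.mem_iff_getElem] at hc
    obtain ⟨j, hj, rfl⟩ := hc
    rw [List.length_drop] at hj
    rw [List.getElem_drop]
    have hlt : k + j < cs.length := by omega
    have := h (k + j) (by omega) hlt
    rwa [List.getD_eq_getElem cs ' ' hlt] at this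

lemma pvCondA_iff (cs : List Char) (hne : cs ≠ []) :
    (0 < (pvALoop cs (cs.length - 1) : Int) ∧ (pvALoop cs (cs.length - 1) : Int) < (cs.length : Int) ∧
      PySem.List.pyGet? cs (pvALoop cs (cs.length - 1) : Int) = some '.') ↔ pvMid cs := by
  have hlen : 0 < cs.length := by
    cases cs with
    | nil => exact absurd rfl hne
    | cons a t => simp
  constructor
  · rintro ⟨h0, hlt, hget⟩
    have h0' : 0 < pvALoop cs (cs.length - 1) := by exact_mod_cast h0
    have hle := pvALoop_le cs (cs.length - 1)
    rw [PySem.List.pyGet?_natCast] at hget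
    exact ⟨pvALoop cs (cs.length - 1), h0', by omega, hget,
      fun m hm hmlen => pvALoop_digits cs (cs.length - 1) m hm (by omega)⟩
  · rintro ⟨i, hi0, hilen, hdot, hdig⟩
    have hstop : PySem.Chars.isdigit (cs.getD i ' ') = false := by
      have hc : cs.getD i ' ' = '.' := by
        rw [List.getD_eq_getElem cs ' ' hilen]
        rw [List.getElem?_eq_getElem hilen] at hdot
        exact Option.some.inj hdot
      rw [hc]; decide
    have heq := pvALoop_eq_of cs i hi0 hstop (cs.length - 1) (by omega)
      (fun m h1 h2 => hdig m h1 (by omega))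
    rw [heq]
    refine ⟨by exact_mod_cast hi0, by exact_mod_cast hilen, ?_⟩
    rw [PySem.List.pyGet?_natCast]
    exact hdot

lemma pvCondB_iff (cs : List Char) :
    (0 < PySem.Chars.rfind cs ['.'] ∧
      (cs.drop (PySem.Chars.rfind cs ['.'] + 1).toNat).all PySem.Chars.isdigit = true) ↔ pvMid cs := by
  unfold PySem.Chars.rfind
  constructor
  · rintro ⟨h0, hall⟩
    have hmem := pvGo_mem cs cs.length (by omega)
    have hrlen : (PySem.Chars.rfind.go cs ['.'] cs.length).toNat < cs.length := by
      by_contra hge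
      rw [List.getElem?_eq_none (by omega)] at hmem
      simp at hmem
    have htn : (PySem.Chars.rfind.go cs ['.'] cs.length + 1).toNat =
        (PySem.Chars.rfind.go cs ['.'] cs.length).toNat + 1 := by omega
    rw [htn] at hall
    refine ⟨(PySem.Chars.rfind.go cs ['.'] cs.length).toNat, by omega, hrlen, hmem, ?_⟩
    intro m hm hmlen
    exact (pvAllDrop cs _).mp hall m (by omega) hmlen
  · rintro ⟨i, hi0, hilen, hdot, hdig⟩
    have hge := pvGo_ge cs cs.length i (by omega) hdot
    have h0 : 0 < PySem.Chars.rfind.go cs ['.'] cs.length := by omega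
    have hmem := pvGo_mem cs cs.length (by omega)
    have hrlen : (PySem.Chars.rfind.go cs ['.'] cs.length).toNat < cs.length := by
      by_contra hge'
      rw [List.getElem?_eq_none (by omega)] at hmem
      simp at hmem
    have hri : (PySem.Chars.rfind.go cs ['.'] cs.length).toNat = i := by
      by_contra hne
      have hlt : i < (PySem.Chars.rfind.go cs ['.'] cs.length).toNat := by omega
      have hdig' := hdig _ hlt hrlen
      have hd' : cs.getD (PySem.Chars.rfind.go cs ['.'] cs.length).toNat ' ' = '.' := by
        rw [List.getD_eq_getElem cs ' ' hrlen]
        rw [List.getElem?_eq_getElem hrlen] at hmem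
        exact Option.some.inj hmem
      rw [hd'] at hdig'
      exact absurd hdig' (by decide)
    refine ⟨h0, ?_⟩
    have htn : (PySem.Chars.rfind.go cs ['.'] cs.length + 1).toNat =
        (PySem.Chars.rfind.go cs ['.'] cs.length).toNat + 1 := by omega
    rw [htn, hri]
    exact (pvAllDrop cs (i + 1)).mpr (fun m hk hm => hdig m (by omega) hm)

lemma pvB_eq (s : String) :
    standardize_token_alt s =
      if 0 < PySem.Str.rfind s "." ∧
          (PySem.Str.slice s (some (PySem.Str.rfind s "." + 1)) none).toList.all PySem.Chars.isdigit = true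
      then s else s ++ ".0" := rfl

lemma pvA_eq (s : String) (h : ¬ s.toList.length = 0) :
    standardize_token s =
      if 0 < (pvALoop s.toList (s.toList.length - 1) : Int) ∧
          (pvALoop s.toList (s.toList.length - 1) : Int) < (s.toList.length : Int) ∧
          PySem.List.pyGet? s.toList (pvALoop s.toList (s.toList.length - 1) : Int) = some '.'
      then s else s ++ ".0" := by
  unfold standardize_token
  show (if 0 < (if s.toList.length = 0 then (s.toList.length : Int) - 1 else (pvALoop s.toList (s.toList.length - 1) : Int)) ∧
        (if s.toList.length = 0 then (s.toList.length : Int) - 1 else (pvALoop s.toList (s.toList.length - 1) : Int)) < (s.toList.length : Int) ∧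
        PySem.List.pyGet? s.toList (if s.toList.length = 0 then (s.toList.length : Int) - 1 else (pvALoop s.toList (s.toList.length - 1) : Int)) = some '.'
      then s else s ++ ".0") = _
  rw [if_neg h]

lemma pvDotList : (".":String).toList = ['.'] := rfl

-- ===== VERDICT (by name: the statement is the Claim_ definition above) =====
theorem standardize_token_spec : Claim_equal_standardize_token := by
  unfold Claim_equal_standardize_token
  intro s _
  unfold Spec_standardize_token
  by_cases hnil : s.toList = []
  · -- empty string: both sides append ".0"
    have hlen0 : s.toList.length = 0 := by rw [hnil]; rfl
    have hA : standardize_token s = s ++ ".0" := by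
      unfold standardize_token
      show (if 0 < (if s.toList.length = 0 then (s.toList.length : Int) - 1 else (pvALoop s.toList (s.toList.length - 1) : Int)) ∧
            (if s.toList.length = 0 then (s.toList.length : Int) - 1 else (pvALoop s.toList (s.toList.length - 1) : Int)) < (s.toList.length : Int) ∧
            PySem.List.pyGet? s.toList (if s.toList.length = 0 then (s.toList.length : Int) - 1 else (pvALoop s.toList (s.toList.length - 1) : Int)) = some '.'
          then s else s ++ ".0") = s ++ ".0"
      rw [if_pos hlen0]
      have hc : ¬ (0 < (s.toList.length : Int) - 1 ∧ (s.toList.length : Int) - 1 < (s.toList.length : Int) ∧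
          PySem.List.pyGet? s.toList ((s.toList.length : Int) - 1) = some '.') := by
        rintro ⟨h0, -, -⟩
        rw [hlen0] at h0
        omega
      rw [if_neg hc]
    have hB : standardize_token_alt s = s ++ ".0" := by
      rw [pvB_eq, if_neg]
      rintro ⟨h0, -⟩
      rw [PySem.Str.rfind_eq, pvDotList, hnil] at h0
      have : PySem.Chars.rfind [] ['.'] = -1 := by decide
      omega
    rw [hA, hB]
  · have hlen : ¬ s.toList.length = 0 := by
      intro h; exact hnil (List.eq_nil_of_length_eq_zero h)
    have hkey : (0 < (pvALoop s.toList (s.toList.length - 1) : Int) ∧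
          (pvALoop s.toList (s.toList.length - 1) : Int) < (s.toList.length : Int) ∧
          PySem.List.pyGet? s.toList (pvALoop s.toList (s.toList.length - 1) : Int) = some '.') ↔
        (0 < PySem.Str.rfind s "." ∧
          (PySem.Str.slice s (some (PySem.Str.rfind s "." + 1)) none).toList.all PySem.Chars.isdigit = true) := by
      rw [pvCondA_iff s.toList hnil, ← pvCondB_iff s.toList]
      rw [PySem.Str.rfind_eq, pvDotList]
      constructor
      · rintro ⟨h0, hall⟩
        refine ⟨h0, ?_⟩
        rw [PySem.Str.toList_slice, PySem.Chars.slice_eq_listSlice, PySem.List.slice_from _ (by omega)]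
        exact hall
      · rintro ⟨h0, hall⟩
        refine ⟨h0, ?_⟩
        rw [PySem.Str.toList_slice, PySem.Chars.slice_eq_listSlice, PySem.List.slice_from _ (by omega)] at hall
        exact hall
    rw [pvA_eq s hlen, pvB_eq]
    by_cases h2 : (0 < PySem.Str.rfind s "." ∧
        (PySem.Str.slice s (some (PySem.Str.rfind s "." + 1)) none).toList.all PySem.Chars.isdigit = true)
    · rw [if_pos (hkey.mpr h2), if_pos h2]
    · rw [if_neg (fun h1 => h2 (hkey.mp h1)), if_neg h2]
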